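-- pv_equiv track=rewrite | github.com/remekozicki/ASD | do_egz_t2/zadania_wiki_wakacje/egz6b/egzP6b.py | knight_jump
-- ===== SOURCE A (Python) =====
-- def map_moves():
--     Dic  = {"UL" : 0,
--         "LU" : 1,
--         "LD" : 2,
--         "DL" : 3,
--         "DR" : 4,
--         "RD" : 5,
--         "RU" : 6,
--         "UR" : 7
--         }
--     # piersza to pionowo deruga to poziomo
--     Moves = [(-1,-2),
--             (-2,-1),
--             (-2,1),
--             (-1,2),
--             (1,2),
--             (2,1),
--             (2,-1),
--             (1,-2)
--             ]
--
--     return Dic, Moves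
--
-- def knight_jump(M):
--     DC, MV = map_moves()
--
--     x = y = 0
--     lights = {}
--
--     lights.update({f'{x},{y}':(x,y)})
--
--     for step in M:
--         idx = DC.get(step)
--         sx,sy = MV[idx]
--         x += sx
--         y += sy
--
--         tmp = lights.get(f'{x},{y}')
--         if tmp:
--             lights.pop(f'{x},{y}')
--         else:
--             lights.update({f'{x},{y}':(x,y)})
--
--     return len(lights)
-- ===== SOURCE B (Python) =====
-- def knight_jump(M):
--     moves = {"UL": (-1, -2),
--              "LU": (-2, -1),
--              "LD": (-2, 1),
--              "DL": (-1, 2),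
--              "DR": (1, 2),
--              "RD": (2, 1),
--              "RU": (2, -1),
--              "UR": (1, -2)}
--     x = y = 0
--     positions = [(0, 0)]
--     for step in M:
--         dx, dy = moves[step]
--         x += dx
--         y += dy
--         positions.append((x, y))
--     counts = {}
--     for p in positions:
--         counts[p] = counts.get(p, 0) + 1
--     return sum(1 for c in counts.values() if c % 2)
-- ===== Notes on version B (the rewrite author's own statement) =====
-- stated objective: alternative
-- what changed: B builds the full path of tuple positions first and then counts the squares visited an odd number of times with a tally dict, instead of A's incremental toggling of a live dict keyed by formatted 'x,y' strings.
import Mathlib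
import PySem

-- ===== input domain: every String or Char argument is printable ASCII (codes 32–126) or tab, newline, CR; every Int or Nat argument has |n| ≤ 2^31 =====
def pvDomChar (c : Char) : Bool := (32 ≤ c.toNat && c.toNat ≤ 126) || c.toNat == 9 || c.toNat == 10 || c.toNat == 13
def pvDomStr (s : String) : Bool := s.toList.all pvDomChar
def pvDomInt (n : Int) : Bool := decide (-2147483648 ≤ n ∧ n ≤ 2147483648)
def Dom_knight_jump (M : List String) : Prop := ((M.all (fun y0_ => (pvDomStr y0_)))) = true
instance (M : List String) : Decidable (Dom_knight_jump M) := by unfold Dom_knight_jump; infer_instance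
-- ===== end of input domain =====

-- B replaces A's live toggling of a dict keyed by formatted "x,y" strings with building the
-- full path of (x,y) pairs and counting the squares visited an odd number of times (alternative
-- decomposition, same asymptotic cost).

-- ===== PORT A =====
-- map_moves(): the dict Dic and the list Moves
def pvDicA : PySem.Dict String Int :=
  PySem.Dict.ofList [("UL", 0), ("LU", 1), ("LD", 2), ("DL", 3), ("DR", 4), ("RD", 5), ("RU", 6), ("UR", 7)]

def pvMovesA : List (Int × Int) :=
  [(-1, -2), (-2, -1), (-2, 1), (-1, 2), (1, 2), (2, 1), (2, -1), (1, -2)]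

-- f'{x},{y}' — built on List Char via PySem.Int.toChars (exact: str(int), ',' , str(int))
def pvKey (x y : Int) : String := String.ofList (PySem.Int.toChars x ++ ',' :: PySem.Int.toChars y)

-- the for-loop over M; `none` = the TypeError Python raises at MV[idx] when DC.get(step) is None
def pvLoopA : List String → Int → Int → PySem.Dict String (Int × Int) → Option (PySem.Dict String (Int × Int))
  | [], _, _, lights => some lights
  | step :: rest, x, y, lights =>
    match pvDicA.get? step with
    | none => none                       -- idx = None → MV[None] raises TypeError
    | some idx =>
      match PySem.List.pyGet? pvMovesA idx with
      | none => none                     -- IndexError (unreachable: idx is 0..7)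
      | some (sx, sy) =>
        let x := x + sx
        let y := y + sy
        -- tmp = lights.get(key); `if tmp:` — tmp is None or a 2-tuple, and a 2-tuple is always truthy
        match lights.get? (pvKey x y) with
        | some _ => pvLoopA rest x y (lights.erase (pvKey x y))          -- lights.pop(key), key present
        | none   => pvLoopA rest x y (lights.insert (pvKey x y) (x, y))  -- lights.update({key: (x,y)})

def knight_jump (M : List String) : Int :=
  -- x = y = 0; lights = {}; lights.update({f'{x},{y}': (x,y)})
  match pvLoopA M 0 0 (PySem.Dict.update PySem.Dict.empty [(pvKey 0 0, ((0 : Int), (0 : Int)))]) with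
  | some lights => (lights.size : Int)   -- len(lights)
  | none => 0                            -- unreachable under Pre_ (Python raises TypeError)

-- ===== PORT B =====
def pvMovesB : PySem.Dict String (Int × Int) :=
  PySem.Dict.ofList [("UL", (-1, -2)), ("LU", (-2, -1)), ("LD", (-2, 1)), ("DL", (-1, 2)),
                     ("DR", (1, 2)), ("RD", (2, 1)), ("RU", (2, -1)), ("UR", (1, -2))]

-- first loop: build positions; `none` = the KeyError raised by moves[step]
def pvPathB : List String → Int → Int → List (Int × Int) → Option (List (Int × Int))
  | [], _, _, positions => some positions
  | step :: rest, x, y, positions =>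
    match pvMovesB.get? step with
    | none => none
    | some (dx, dy) => pvPathB rest (x + dx) (y + dy) (positions ++ [(x + dx, y + dy)])

def knight_jump_alt (M : List String) : Int :=
  match pvPathB M 0 0 [((0 : Int), (0 : Int))] with
  | some positions =>
    -- counts = {}; for p in positions: counts[p] = counts.get(p, 0) + 1
    let counts := positions.foldl (fun d p => d.insert p (d.getD p 0 + 1)) PySem.Dict.empty
    -- sum(1 for c in counts.values() if c % 2)
    counts.values.foldl (fun acc c => if PySem.Int.mod c 2 ≠ 0 then acc + 1 else acc) 0
  | none => 0                            -- unreachable under Pre_ (Python raises KeyError)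

-- ===== PRECONDITION & SPEC =====
-- Pre_ excludes exactly the inputs containing a move outside the 8 knight codes, on which
-- Python A raises TypeError (and Python B raises KeyError): A returns nothing there.
def Pre_knight_jump (M : List String) : Prop :=
  ∀ s ∈ M, s ∈ (["UL", "LU", "LD", "DL", "DR", "RD", "RU", "UR"] : List String)
instance (M : List String) : Decidable (Pre_knight_jump M) := by unfold Pre_knight_jump; infer_instance

def pvWitness_knight_jump : List String := ["UL", "DR", "RU", "UL"]

def Spec_knight_jump (M : List String) (out : Int) : Prop := out = knight_jump_alt M
instance (M : List String) (out : Int) : Decidable (Spec_knight_jump M out) := by unfold Spec_knight_jump; infer_instance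

-- ===== CLAIM (what is proved, stated in full; the proofs are below) =====
def Claim_equal_knight_jump : Prop := ∀ (M : List String), Dom_knight_jump M → Pre_knight_jump M → Spec_knight_jump M (knight_jump M)

-- ===== LEMMAS AND PROOFS =====

/- ## Injectivity of the f-string key -/

-- decimal representation of a Nat, most significant digit first (= Nat.toDigits 10)
def pvRep (n : Nat) : List Char :=
  if h : n < 10 then [Nat.digitChar n] else pvRep (n / 10) ++ [Nat.digitChar (n % 10)]
decreasing_by exact Nat.div_lt_self (by omega) (by omega)

lemma pvRep_toDigitsCore (f : Nat) : ∀ n acc, n < f →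
    Nat.toDigitsCore 10 f n acc = pvRep n ++ acc := by
  induction f with
  | zero => omega
  | succ f ih =>
    intro n acc h
    rw [Nat.toDigitsCore]
    by_cases h10 : n < 10
    · have : n / 10 = 0 := Nat.div_eq_of_lt h10
      simp [this, pvRep, h10, Nat.mod_eq_of_lt h10]
    · have hne : ¬ n / 10 = 0 := by
        intro h0; exact h10 (by omega)
      simp only [hne, if_false]
      rw [ih (n / 10) _ (by omega)]
      conv_rhs => rw [pvRep]
      simp [h10]

lemma pvRep_toDigits (n : Nat) : Nat.toDigits 10 n = pvRep n := by
  have := pvRep_toDigitsCore (n + 1) n [] (by omega)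
  simpa [Nat.toDigits] using this

def pvVal (cs : List Char) : Nat := cs.foldl (fun a c => a * 10 + (c.toNat - 48)) 0

lemma pvDigit_toNat (d : Nat) (h : d < 10) : (Nat.digitChar d).toNat = 48 + d := by
  interval_cases d <;> rfl

lemma pvVal_pvRep (n : Nat) : pvVal (pvRep n) = n := by
  induction n using Nat.strong_induction_on with
  | _ n ih =>
    by_cases h : n < 10
    · rw [pvRep, dif_pos h]
      interval_cases n <;> rfl
    · rw [pvRep, dif_neg h]
      have ihv := ih (n / 10) (Nat.div_lt_self (by omega) (by omega))
      unfold pvVal at *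
      rw [List.foldl_append, ihv]
      simp only [List.foldl_cons, List.foldl_nil]
      rw [pvDigit_toNat (n % 10) (Nat.mod_lt _ (by omega))]
      omega

lemma pvRep_digit (n : Nat) : ∀ c ∈ pvRep n, 48 ≤ c.toNat ∧ c.toNat ≤ 57 := by
  induction n using Nat.strong_induction_on with
  | _ n ih =>
    by_cases h : n < 10
    · rw [pvRep, dif_pos h]
      intro c hc
      simp only [List.mem_singleton] at hc
      subst hc
      interval_cases n <;> simp [Nat.digitChar]
    · rw [pvRep, dif_neg h]
      intro c hc
      rcases List.mem_append.mp hc with h1 | h1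
      · exact ih (n / 10) (Nat.div_lt_self (by omega) (by omega)) c h1
      · simp only [List.mem_singleton] at h1
        subst h1
        have : n % 10 < 10 := Nat.mod_lt _ (by omega)
        interval_cases (n % 10) <;> simp_all [Nat.digitChar]

lemma pvToChars_digit (n : Int) : ∀ c ∈ PySem.Int.toChars n, c = '-' ∨ (48 ≤ c.toNat ∧ c.toNat ≤ 57) := by
  intro c hc
  unfold PySem.Int.toChars at hc
  split at hc
  · rcases List.mem_cons.mp hc with h | h
    · exact Or.inl h
    · exact Or.inr (pvRep_digit _ c (by rwa [← pvRep_toDigits]))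
  · exact Or.inr (pvRep_digit _ c (by rwa [← pvRep_toDigits]))

lemma pvRep_inj {m n : Nat} (h : pvRep m = pvRep n) : m = n := by
  have := congrArg pvVal h
  rwa [pvVal_pvRep, pvVal_pvRep] at this

lemma pvDash_not_pvRep (n : Nat) : '-' ∉ pvRep n := by
  intro h
  have := pvRep_digit n '-' h
  revert this; decide

lemma pvToChars_inj (a b : Int) (h : PySem.Int.toChars a = PySem.Int.toChars b) : a = b := by
  unfold PySem.Int.toChars at h
  by_cases ha : a < 0 <;> by_cases hb : b < 0 <;>
    simp only [ha, hb, if_pos, if_neg, not_false_iff, pvRep_toDigits] at h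
  · rw [List.cons_eq_cons] at h
    have := pvRep_inj h.2
    omega
  · exact absurd (h ▸ List.mem_cons_self) (pvDash_not_pvRep b.toNat)
  · exact absurd (h.symm ▸ List.mem_cons_self) (pvDash_not_pvRep a.toNat)
  · have := pvRep_inj h
    omega

lemma pvComma_not_toChars (n : Int) : ',' ∉ PySem.Int.toChars n := by
  intro h
  rcases pvToChars_digit n ',' h with h1 | h1
  · exact absurd h1 (by decide)
  · revert h1; decide

lemma pvSplit_comma {l1 r1 l2 r2 : List Char} (h : l1 ++ ',' :: r1 = l2 ++ ',' :: r2)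
    (h1 : ',' ∉ l1) (h2 : ',' ∉ l2) : l1 = l2 ∧ r1 = r2 := by
  induction l1 generalizing l2 with
  | nil =>
    cases l2 with
    | nil => simpa using h
    | cons c l2 =>
      simp only [List.nil_append, List.cons_append, List.cons.injEq] at h
      exact absurd (h.1 ▸ List.mem_cons_self) h2
  | cons c l1 ih =>
    cases l2 with
    | nil =>
      simp only [List.cons_append, List.nil_append, List.cons.injEq] at h
      exact absurd (h.1 ▸ List.mem_cons_self) h1
    | cons d l2 =>
      simp only [List.cons_append, List.cons.injEq] at h
      obtain ⟨rfl, h⟩ := h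
      have := ih h (fun hm => h1 (List.mem_cons_of_mem _ hm)) (fun hm => h2 (List.mem_cons_of_mem _ hm))
      exact ⟨by rw [this.1], this.2⟩

lemma pvKey_inj {x y x' y' : Int} (h : pvKey x y = pvKey x' y') : x = x' ∧ y = y' := by
  unfold pvKey at h
  rw [String.ofList_inj] at h
  obtain ⟨h1, h2⟩ := pvSplit_comma h (pvComma_not_toChars x) (pvComma_not_toChars x')
  exact ⟨pvToChars_inj _ _ h1, pvToChars_inj _ _ h2⟩

/- ## A's dict as a list of positions -/

def pvDictOf (T : List (Int × Int)) : PySem.Dict String (Int × Int) :=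
  PySem.Dict.mk (T.map (fun p => (pvKey p.1 p.2, p)))

-- toggle of T by the successive path positions (erase = Dict.erase's filter)
def pvTogl : List (Int × Int) → List (Int × Int) → List (Int × Int)
  | acc, [] => acc
  | acc, p :: ps => pvTogl (if p ∈ acc then acc.filter (fun r => ¬ r = p) else acc ++ [p]) ps

lemma pvKey_beq (r q : Int × Int) :
    (pvKey r.1 r.2 == pvKey q.1 q.2) = decide (r = q) := by
  by_cases h : r = q
  · subst h; simp
  · have hne : pvKey r.1 r.2 ≠ pvKey q.1 q.2 := fun he => by
      obtain ⟨h1, h2⟩ := pvKey_inj he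
      exact h (Prod.ext h1 h2)
    simp [hne, h]

lemma pvDictOf_get? (T : List (Int × Int)) (q : Int × Int) :
    (pvDictOf T).get? (pvKey q.1 q.2) = if q ∈ T then some q else none := by
  induction T with
  | nil => simp [pvDictOf, PySem.Dict.get?]
  | cons r T ih =>
    simp only [pvDictOf, PySem.Dict.get?, List.map_cons, List.find?_cons] at ih ⊢
    by_cases h : r = q
    · subst h; simp [pvKey_beq]
    · rw [show (pvKey r.1 r.2 == pvKey q.1 q.2) = false by simp [pvKey_beq, h]]
      simp only [cond_false]
      rw [ih]
      by_cases hm : q ∈ T <;> simp [hm] <;> exact fun he => h he.symm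

lemma pvDictOf_erase (T : List (Int × Int)) (q : Int × Int) :
    (pvDictOf T).erase (pvKey q.1 q.2) = pvDictOf (T.filter (fun r => ¬ r = q)) := by
  simp only [pvDictOf, PySem.Dict.erase, List.filter_map, PySem.Dict.mk.injEq]
  congr 1
  apply List.filter_congr
  intro r _
  simp [Function.comp, pvKey_beq, decide_not]

lemma pvDictOf_insert (T : List (Int × Int)) (q : Int × Int) (hq : q ∉ T) :
    (pvDictOf T).insert (pvKey q.1 q.2) q = pvDictOf (T ++ [q]) := by
  have hc : (pvDictOf T).contains (pvKey q.1 q.2) = false := by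
    simp only [pvDictOf, PySem.Dict.contains, List.any_map, List.any_eq_false]
    intro r hr
    simp only [Function.comp, pvKey_beq]
    simp only [decide_eq_true_eq]
    exact fun he => hq (he ▸ hr)
  unfold PySem.Dict.insert
  rw [hc]
  simp [pvDictOf]

lemma pvDecode_eq (step : String) :
    (pvDicA.get? step).bind (fun idx => PySem.List.pyGet? pvMovesA idx) = pvMovesB.get? step := by
  by_cases h1 : step = "UL"; · subst h1; rfl
  by_cases h2 : step = "LU"; · subst h2; rfl
  by_cases h3 : step = "LD"; · subst h3; rfl
  by_cases h4 : step = "DL"; · subst h4; rfl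
  by_cases h5 : step = "DR"; · subst h5; rfl
  by_cases h6 : step = "RD"; · subst h6; rfl
  by_cases h7 : step = "RU"; · subst h7; rfl
  by_cases h8 : step = "UR"; · subst h8; rfl
  have e1 : pvDicA.get? step = none := by
    have hitems : pvDicA.items =
        [("UL", (0 : Int)), ("LU", 1), ("LD", 2), ("DL", 3), ("DR", 4), ("RD", 5), ("RU", 6), ("UR", 7)] := by rfl
    simp only [PySem.Dict.get?, hitems, Option.map_eq_none_iff]
    rw [List.find?_eq_none]
    intro p hp
    fin_cases hp <;> simp only [beq_iff_eq] <;>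
      first
        | exact Ne.symm h1 | exact Ne.symm h2 | exact Ne.symm h3 | exact Ne.symm h4
        | exact Ne.symm h5 | exact Ne.symm h6 | exact Ne.symm h7 | exact Ne.symm h8
  have e2 : pvMovesB.get? step = none := by
    have hitems : pvMovesB.items =
        [("UL", ((-1 : Int), (-2 : Int))), ("LU", (-2, -1)), ("LD", (-2, 1)), ("DL", (-1, 2)),
         ("DR", (1, 2)), ("RD", (2, 1)), ("RU", (2, -1)), ("UR", (1, -2))] := by rfl
    simp only [PySem.Dict.get?, hitems, Option.map_eq_none_iff]
    rw [List.find?_eq_none]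
    intro p hp
    fin_cases hp <;> simp only [beq_iff_eq] <;>
      first
        | exact Ne.symm h1 | exact Ne.symm h2 | exact Ne.symm h3 | exact Ne.symm h4
        | exact Ne.symm h5 | exact Ne.symm h6 | exact Ne.symm h7 | exact Ne.symm h8
  simp [e1, e2]

lemma pvPathB_acc (rest : List String) : ∀ x y acc,
    pvPathB rest x y acc = (pvPathB rest x y []).map (acc ++ ·) := by
  induction rest with
  | nil => intro x y acc; simp [pvPathB]
  | cons step rest ih =>
    intro x y acc
    simp only [pvPathB]
    cases hm : pvMovesB.get? step with
    | none => rfl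
    | some d =>
      obtain ⟨dx, dy⟩ := d
      dsimp only
      rw [ih (x + dx) (y + dy) (acc ++ [(x + dx, y + dy)]),
          ih (x + dx) (y + dy) ([] ++ [(x + dx, y + dy)])]
      simp [Option.map_map, Function.comp_def]

lemma pvLoopA_eq (rest : List String) : ∀ x y (T : List (Int × Int)),
    pvLoopA rest x y (pvDictOf T) = (pvPathB rest x y []).map (fun ps => pvDictOf (pvTogl T ps)) := by
  induction rest with
  | nil => intro x y T; simp [pvLoopA, pvPathB, pvTogl]
  | cons step rest ih =>
    intro x y T
    have hdec := pvDecode_eq step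
    simp only [pvLoopA, pvPathB]
    cases hd : pvDicA.get? step with
    | none =>
      rw [hd] at hdec
      simp only [Option.bind_none] at hdec
      rw [← hdec]
      rfl
    | some idx =>
      rw [hd] at hdec
      simp only [Option.bind_some] at hdec
      dsimp only
      cases hg : PySem.List.pyGet? pvMovesA idx with
      | none =>
        rw [hg] at hdec
        rw [← hdec]
        rfl
      | some d =>
        obtain ⟨sx, sy⟩ := d
        rw [hg] at hdec
        rw [← hdec]
        dsimp only
        have hget := pvDictOf_get? T (x + sx, y + sy)
        simp only at hget
        rw [hget]
        by_cases hmem : (x + sx, y + sy) ∈ T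
        · rw [if_pos hmem]
          have her := pvDictOf_erase T (x + sx, y + sy)
          simp only at her
          rw [her, ih]
          dsimp only
          rw [pvPathB_acc rest (x + sx) (y + sy) ([] ++ [(x + sx, y + sy)])]
          rw [Option.map_map]
          congr 1
          funext ps
          simp only [Function.comp_apply, List.nil_append, List.singleton_append, pvTogl, if_pos hmem]
        · rw [if_neg hmem]
          have hin := pvDictOf_insert T (x + sx, y + sy) hmem
          simp only at hin
          rw [hin, ih]
          dsimp only
          rw [pvPathB_acc rest (x + sx) (y + sy) ([] ++ [(x + sx, y + sy)])]
          rw [Option.map_map]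
          congr 1
          funext ps
          simp only [Function.comp_apply, List.nil_append, List.singleton_append, pvTogl, if_neg hmem]

lemma pvMovesB_get_key : ∀ s ∈ (["UL", "LU", "LD", "DL", "DR", "RD", "RU", "UR"] : List String),
    (pvMovesB.get? s).isSome := by decide

lemma pvPathB_total (rest : List String) : ∀ x y acc, (∀ s ∈ rest, s ∈ (["UL", "LU", "LD", "DL", "DR", "RD", "RU", "UR"] : List String)) →
    (pvPathB rest x y acc).isSome := by
  induction rest with
  | nil => intro x y acc _; simp [pvPathB]
  | cons step rest ih =>
    intro x y acc h
    have hs := h step List.mem_cons_self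
    cases hm : pvMovesB.get? step with
    | none =>
      have := pvMovesB_get_key step hs
      rw [hm] at this
      simp at this
    | some d =>
      obtain ⟨dx, dy⟩ := d
      simp only [pvPathB, hm]
      exact ih _ _ _ (fun s hs' => h s (List.mem_cons_of_mem _ hs'))

lemma pvTogl_spec (ps : List (Int × Int)) : ∀ acc, acc.Nodup →
    (pvTogl acc ps).Nodup ∧ ∀ q, q ∈ pvTogl acc ps ↔ ((q ∈ acc) ↔ ps.count q % 2 = 0) := by
  induction ps with
  | nil =>
    intro acc h
    refine ⟨h, fun q => ?_⟩
    simp [pvTogl]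
  | cons p ps ih =>
    intro acc h
    simp only [pvTogl]
    by_cases hp : p ∈ acc
    · rw [if_pos hp]
      obtain ⟨h1, h2⟩ := ih _ (h.filter _)
      refine ⟨h1, fun q => ?_⟩
      rw [h2 q]
      by_cases hqp : q = p
      · subst hqp
        simp only [List.mem_filter, List.count_cons_self, decide_not, hp]
        simp
        omega
      · simp only [List.mem_filter, decide_not, hqp]
        simp
        rw [List.count_cons, if_neg (by simp [beq_iff_eq]; exact fun he => hqp he.symm : ¬ (p == q) = true)]
        simp
    · rw [if_neg hp]
      have hnd : (acc ++ [p]).Nodup := by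
        rw [List.nodup_append]
        refine ⟨h, List.nodup_singleton _, ?_⟩
        intro a ha b hb
        rw [List.mem_singleton] at hb
        subst hb
        exact fun he => hp (he ▸ ha)
      obtain ⟨h1, h2⟩ := ih _ hnd
      refine ⟨h1, fun q => ?_⟩
      rw [h2 q]
      by_cases hqp : q = p
      · subst hqp
        simp only [List.mem_append, List.mem_singleton, List.count_cons_self, hp]
        simp [hp]
        omega
      · simp only [List.mem_append, List.mem_singleton, hqp]
        simp [hqp]
        rw [List.count_cons, if_neg (by simp [beq_iff_eq]; exact fun he => hqp he.symm : ¬ (p == q) = true)]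
        simp

lemma pvFoldCount (l : List Int) :
    l.foldl (fun acc c => if PySem.Int.mod c 2 ≠ 0 then acc + 1 else acc) 0
      = ((l.countP (fun c => !(PySem.Int.mod c 2 == 0)) : Nat) : Int) := by
  have h := PySem.List.foldl_count_if (fun c => !(PySem.Int.mod c 2 == 0)) l 0
  simpa using h

lemma pvModCast (n : Nat) : PySem.Int.mod (n : Int) 2 = ((n % 2 : Nat) : Int) := by
  rw [show (2 : Int) = ((2 : Nat) : Int) from rfl, PySem.Int.mod_natCast]

-- ===== VERDICT (by name: the statement is the Claim_ definition above) =====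
theorem knight_jump_spec : Claim_equal_knight_jump := by
  intro M _ hpre
  unfold Spec_knight_jump knight_jump knight_jump_alt
  rw [show (PySem.Dict.update PySem.Dict.empty [(pvKey 0 0, ((0 : Int), (0 : Int)))])
        = pvDictOf [((0 : Int), (0 : Int))] from rfl]
  rw [pvLoopA_eq]
  have htot := pvPathB_total M 0 0 [] hpre
  cases hps : pvPathB M 0 0 [] with
  | none => rw [hps] at htot; simp at htot
  | some ps =>
    rw [pvPathB_acc M 0 0 [((0 : Int), (0 : Int))]]
    rw [hps]
    simp only [Option.map_some, List.singleton_append]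
    rw [PySem.Dict.foldl_insert_getD_add_one_eq_counter]
    have hval : (PySem.Dict.counter (((0 : Int), (0 : Int)) :: ps)).values
        = (PySem.Set.ofList (((0 : Int), (0 : Int)) :: ps)).map
            (fun k => (List.count k (((0 : Int), (0 : Int)) :: ps) : Int)) := by
      unfold PySem.Dict.values
      rw [PySem.Dict.items_counter, List.map_map]
      rfl
    rw [hval, pvFoldCount, List.countP_map]
    have hsize : (pvDictOf (pvTogl [((0 : Int), (0 : Int))] ps)).size
        = (pvTogl [((0 : Int), (0 : Int))] ps).length := by
      simp [pvDictOf, PySem.Dict.size]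
    rw [hsize]
    congr 1
    obtain ⟨hnd, hmem⟩ := pvTogl_spec ps [((0 : Int), (0 : Int))] (List.nodup_singleton _)
    rw [List.countP_eq_length_filter]
    have hperm : (pvTogl [((0 : Int), (0 : Int))] ps).Perm
        ((PySem.Set.ofList (((0 : Int), (0 : Int)) :: ps)).filter
          ((fun c => !(PySem.Int.mod c 2 == 0)) ∘ fun k => (List.count k (((0 : Int), (0 : Int)) :: ps) : Int))) := by
      rw [List.perm_ext_iff_of_nodup hnd ((PySem.Set.nodup_ofList _).filter _)]
      intro q
      rw [hmem q, List.mem_filter, PySem.Set.mem_ofList]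
      simp only [Function.comp_apply, pvModCast, Bool.not_eq_eq_eq_not, Bool.not_true,
        beq_eq_false_iff_ne, ne_eq, Nat.cast_eq_zero]
      by_cases hq : q = ((0 : Int), (0 : Int))
      · subst hq
        simp only [List.mem_singleton, List.count_cons_self, List.mem_cons, true_or, true_and,
          true_iff]
        omega
      · simp only [List.mem_singleton, hq, false_iff, List.mem_cons, false_or]
        rw [List.count_cons, if_neg (by simp [beq_iff_eq]; exact fun he => hq he.symm : ¬ (((0 : Int), (0 : Int)) == q) = true)]
        simp only [List.not_mem_nil, false_iff, Nat.add_zero]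
        constructor
        · intro hodd
          refine ⟨List.count_pos_iff.mp (by omega), by omega⟩
        · intro ⟨_, hodd⟩
          omega
    exact hperm.length_eq
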